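-- pv_equiv track=rewrite | github.com/MakimaGorky/ComputerGraphicsPlayground | src/indiv/I1/quick_hull.py | find_hull
-- ===== SOURCE A (Python) =====
-- from typing import List, Tuple
--
-- def cross_product(o: Tuple[int, int], a: Tuple[int, int], b: Tuple[int, int]) -> float:
--     """Вычисляет векторное произведение векторов OA и OB"""
--     return (a[0] - o[0]) * (b[1] - o[1]) - (a[1] - o[1]) * (b[0] - o[0])
--
-- def distance_to_line(point: Tuple[int, int], line_start: Tuple[int, int],
--                      line_end: Tuple[int, int]) -> float:
--     """Вычисляет расстояние от точки до линии"""
--     return abs(cross_product(line_start, line_end, point))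
--
-- def find_hull(points_set: List[Tuple[int, int]], p1: Tuple[int, int],
--               p2: Tuple[int, int]) -> List[Tuple[int, int]]:
--     """
--     Рекурсивная функция QuickHull
--     Находит точки выпуклой оболочки с одной стороны от линии p1-p2
--     """
--     if not points_set:
--         return []
--
--     # Находим самую дальнюю точку от линии p1-p2
--     max_dist = 0
--     farthest_point = None
--
--     for point in points_set:
--         dist = distance_to_line(point, p1, p2)
--         if dist > max_dist:
--             max_dist = dist
--             farthest_point = point
--
--     if farthest_point is None:
--         return []
--
--     # Разделяем оставшиеся точки на две группы
--     left_set = []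
--     right_set = []
--
--     for point in points_set:
--         if point == farthest_point:
--             continue
--
--         # Проверяем, с какой стороны от новых линий находится точка
--         if cross_product(p1, farthest_point, point) > 0:
--             left_set.append(point)
--         elif cross_product(farthest_point, p2, point) > 0:
--             right_set.append(point)
--
--     # Рекурсивно обрабатываем обе части
--     left_hull = find_hull(left_set, p1, farthest_point)
--     right_hull = find_hull(right_set, farthest_point, p2)
--
--     # Объединяем результаты
--     return left_hull + [farthest_point] + right_hull
-- ===== SOURCE B (Python) =====
-- from typing import List, Tuple
--
--
-- def find_hull(points_set: List[Tuple[int, int]], p1: Tuple[int, int],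
--               p2: Tuple[int, int]) -> List[Tuple[int, int]]:
--     """Iterative QuickHull side-expansion: explicit LIFO work stack instead of
--     recursion; items are either ('emit', point) or ('task', pts, a, b)."""
--     result = []
--     stack = [("task", points_set, p1, p2)]
--     while stack:
--         item = stack.pop()
--         if item[0] == "emit":
--             result.append(item[1])
--             continue
--         _, pts, a, b = item
--         if not pts:
--             continue
--         max_dist = 0
--         farthest = None
--         for pt in pts:
--             d = abs((b[0] - a[0]) * (pt[1] - a[1]) - (b[1] - a[1]) * (pt[0] - a[0]))
--             if d > max_dist:
--                 max_dist = d
--                 farthest = pt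
--         if farthest is None:
--             continue
--         left, right = [], []
--         for pt in pts:
--             if pt == farthest:
--                 continue
--             if (farthest[0] - a[0]) * (pt[1] - a[1]) - (farthest[1] - a[1]) * (pt[0] - a[0]) > 0:
--                 left.append(pt)
--             elif (b[0] - farthest[0]) * (pt[1] - farthest[1]) - (b[1] - farthest[1]) * (pt[0] - farthest[0]) > 0:
--                 right.append(pt)
--         # push in reverse order so they pop in-order: left, emit farthest, right
--         stack.append(("task", right, farthest, b))
--         stack.append(("emit", farthest))
--         stack.append(("task", left, a, farthest))
--     return result
-- ===== Notes on version B (the rewrite author's own statement) =====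
-- stated objective: alternative
-- what changed: Replaces the recursive QuickHull expansion with an iterative loop over an explicit LIFO stack of emit/subproblem work items, accumulating the hull in one result list instead of concatenating recursive return values.
import Mathlib
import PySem

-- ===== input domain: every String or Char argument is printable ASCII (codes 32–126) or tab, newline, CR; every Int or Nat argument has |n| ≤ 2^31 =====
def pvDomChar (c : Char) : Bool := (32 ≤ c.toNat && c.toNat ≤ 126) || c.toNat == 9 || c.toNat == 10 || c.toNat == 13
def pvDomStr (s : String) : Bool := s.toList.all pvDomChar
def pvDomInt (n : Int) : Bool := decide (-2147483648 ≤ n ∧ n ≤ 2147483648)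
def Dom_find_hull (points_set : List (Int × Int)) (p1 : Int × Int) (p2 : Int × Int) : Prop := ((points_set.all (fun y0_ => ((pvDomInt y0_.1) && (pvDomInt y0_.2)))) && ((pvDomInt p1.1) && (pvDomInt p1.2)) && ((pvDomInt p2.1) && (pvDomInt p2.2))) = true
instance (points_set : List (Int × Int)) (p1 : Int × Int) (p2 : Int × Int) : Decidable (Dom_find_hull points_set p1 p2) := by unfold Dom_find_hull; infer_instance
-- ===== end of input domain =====

-- B replaces the recursive QuickHull side-expansion by an iterative loop over an
-- explicit LIFO work stack (alternative decomposition; same asymptotic cost).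


-- ===== PORT A =====
def cross_product (o a b : Int × Int) : Int :=
  (a.1 - o.1) * (b.2 - o.2) - (a.2 - o.2) * (b.1 - o.1)

def distance_to_line (point line_start line_end : Int × Int) : Int :=
  |cross_product line_start line_end point|

-- the farthest-point scan (first strict `>` improvement wins, as in both Pythons)
def farthestStep (p1 p2 : Int × Int) (st : Int × Option (Int × Int)) (pt : Int × Int) :
    Int × Option (Int × Int) :=
  if distance_to_line pt p1 p2 > st.1 then (distance_to_line pt p1 p2, some pt) else st

def findFarthest (s : List (Int × Int)) (p1 p2 : Int × Int) : Int × Option (Int × Int) :=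
  s.foldl (farthestStep p1 p2) (0, none)

-- the left/right partition scan (identical in both Pythons)
def partStep (p1 f p2 : Int × Int) (st : List (Int × Int) × List (Int × Int))
    (pt : Int × Int) : List (Int × Int) × List (Int × Int) :=
  if pt = f then st
  else if cross_product p1 f pt > 0 then (st.1 ++ [pt], st.2)
  else if cross_product f p2 pt > 0 then (st.1, st.2 ++ [pt])
  else st

def partitionPoints (s : List (Int × Int)) (p1 f p2 : Int × Int) :
    List (Int × Int) × List (Int × Int) :=
  s.foldl (partStep p1 f p2) ([], [])

-- fuel guard only: fuel = |s|+1 never runs out (sub-lists shrink strictly)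
def findHullFuel : Nat → List (Int × Int) → (Int × Int) → (Int × Int) → List (Int × Int)
  | 0, _, _, _ => []
  | fuel+1, s, p1, p2 =>
    if s = [] then []
    else
      match (findFarthest s p1 p2).2 with
      | none => []
      | some f =>
        let lr := partitionPoints s p1 f p2
        findHullFuel fuel lr.1 p1 f ++ [f] ++ findHullFuel fuel lr.2 f p2

def find_hull (points_set : List (Int × Int)) (p1 : Int × Int) (p2 : Int × Int) :
    List (Int × Int) :=
  findHullFuel (points_set.length + 1) points_set p1 p2

-- ===== PORT B =====
inductive HItem : Type
  | emit : (Int × Int) → HItem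
  | task : List (Int × Int) → (Int × Int) → (Int × Int) → HItem
deriving DecidableEq, Repr

-- the while-loop over the explicit stack; fuel guard only (4n+3 steps suffice)
def runStack : Nat → List HItem → List (Int × Int) → List (Int × Int)
  | 0, _, acc => acc
  | _+1, [], acc => acc
  | fuel+1, HItem.emit p :: rest, acc => runStack fuel rest (acc ++ [p])
  | fuel+1, HItem.task s p1 p2 :: rest, acc =>
    if s = [] then runStack fuel rest acc
    else
      match (findFarthest s p1 p2).2 with
      | none => runStack fuel rest acc
      | some f =>
        let lr := partitionPoints s p1 f p2
        runStack fuel (HItem.task lr.1 p1 f :: HItem.emit f :: HItem.task lr.2 f p2 :: rest) acc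

def find_hull_alt (points_set : List (Int × Int)) (p1 : Int × Int) (p2 : Int × Int) :
    List (Int × Int) :=
  runStack (4 * points_set.length + 3) [HItem.task points_set p1 p2] []

-- ===== PRECONDITION & SPEC =====
def Spec_find_hull (points_set : List (Int × Int)) (p1 : Int × Int) (p2 : Int × Int) (out : List (Int × Int)) : Prop := out = find_hull_alt points_set p1 p2
instance (points_set : List (Int × Int)) (p1 : Int × Int) (p2 : Int × Int) (out : List (Int × Int)) : Decidable (Spec_find_hull points_set p1 p2 out) := by unfold Spec_find_hull; infer_instance

-- ===== CLAIM (what is proved, stated in full; the proofs are below) =====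
def Claim_equal_find_hull : Prop := ∀ (points_set : List (Int × Int)) (p1 : Int × Int) (p2 : Int × Int), Dom_find_hull points_set p1 p2 → Spec_find_hull points_set p1 p2 (find_hull points_set p1 p2)

-- ===== LEMMAS AND PROOFS =====

-- the farthest point, if any, is an element of the scanned list
lemma far_mem (p1 p2 f : Int × Int) :
    ∀ (s : List (Int × Int)) (st : Int × Option (Int × Int)),
      (s.foldl (farthestStep p1 p2) st).2 = some f → f ∈ s ∨ st.2 = some f := by
  intro s
  induction s with
  | nil => intro st h; exact Or.inr h
  | cons x xs ih =>
    intro st h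
    simp only [List.foldl_cons] at h
    rcases ih (farthestStep p1 p2 st x) h with h1 | h2
    · exact Or.inl (List.mem_cons_of_mem _ h1)
    · unfold farthestStep at h2
      split at h2
      · simp at h2; exact Or.inl (by simp [h2])
      · exact Or.inr h2

-- partition never grows by more than the number of scanned points
lemma part_len_le (p1 f p2 : Int × Int) :
    ∀ (s : List (Int × Int)) (st : List (Int × Int) × List (Int × Int)),
      (s.foldl (partStep p1 f p2) st).1.length + (s.foldl (partStep p1 f p2) st).2.length
        ≤ st.1.length + st.2.length + s.length := by
  intro s
  induction s with
  | nil => intro st; simp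
  | cons x xs ih =>
    intro st
    simp only [List.foldl_cons, List.length_cons]
    have h := ih (partStep p1 f p2 st x)
    have : (partStep p1 f p2 st x).1.length + (partStep p1 f p2 st x).2.length
        ≤ st.1.length + st.2.length + 1 := by
      unfold partStep; split_ifs <;> simp <;> omega
    omega

-- with f among the scanned points, the partition is strictly smaller
lemma part_len_lt (p1 f p2 : Int × Int) :
    ∀ (s : List (Int × Int)) (st : List (Int × Int) × List (Int × Int)), f ∈ s →
      (s.foldl (partStep p1 f p2) st).1.length + (s.foldl (partStep p1 f p2) st).2.length + 1
        ≤ st.1.length + st.2.length + s.length := by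
  intro s
  induction s with
  | nil => intro st h; simp at h
  | cons x xs ih =>
    intro st hmem
    simp only [List.foldl_cons, List.length_cons]
    by_cases hx : f = x
    · have hstep : partStep p1 f p2 st x = st := by
        unfold partStep; simp [hx.symm]
      rw [hstep]
      have := part_len_le p1 f p2 xs st
      omega
    · have hf : f ∈ xs := by
        rcases List.mem_cons.mp hmem with h | h
        · exact absurd h hx
        · exact h
      have h := ih (partStep p1 f p2 st x) hf
      have : (partStep p1 f p2 st x).1.length + (partStep p1 f p2 st x).2.length
          ≤ st.1.length + st.2.length + 1 := by
        unfold partStep; split_ifs <;> simp <;> omega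
      omega

lemma partition_lt (p1 p2 f : Int × Int) (s : List (Int × Int)) (l r : List (Int × Int))
    (hfs : f ∈ s) (hlr : partitionPoints s p1 f p2 = (l, r)) :
    l.length + r.length + 1 ≤ s.length := by
  have h : (partitionPoints s p1 f p2).1.length + (partitionPoints s p1 f p2).2.length + 1
      ≤ ([] : List (Int × Int)).length + ([] : List (Int × Int)).length + s.length :=
    part_len_lt p1 f p2 s ([], []) hfs
  rw [hlr] at h
  simpa using h

-- single-step unfolding lemmas
lemma findHullFuel_succ (fuel : Nat) (s : List (Int × Int)) (p1 p2 : Int × Int) :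
    findHullFuel (fuel+1) s p1 p2 =
      (if s = [] then []
       else
        match (findFarthest s p1 p2).2 with
        | none => []
        | some f =>
          let lr := partitionPoints s p1 f p2
          findHullFuel fuel lr.1 p1 f ++ [f] ++ findHullFuel fuel lr.2 f p2) := rfl

lemma runStack_nil (fuel : Nat) (acc : List (Int × Int)) : runStack fuel [] acc = acc := by
  cases fuel <;> rfl

lemma runStack_emit (fuel : Nat) (p : Int × Int) (rest : List HItem) (acc : List (Int × Int)) :
    runStack (fuel+1) (HItem.emit p :: rest) acc = runStack fuel rest (acc ++ [p]) := rfl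

lemma runStack_task (fuel : Nat) (s : List (Int × Int)) (p1 p2 : Int × Int)
    (rest : List HItem) (acc : List (Int × Int)) :
    runStack (fuel+1) (HItem.task s p1 p2 :: rest) acc =
      (if s = [] then runStack fuel rest acc
       else
        match (findFarthest s p1 p2).2 with
        | none => runStack fuel rest acc
        | some f =>
          let lr := partitionPoints s p1 f p2
          runStack fuel
            (HItem.task lr.1 p1 f :: HItem.emit f :: HItem.task lr.2 f p2 :: rest) acc) := rfl

-- A's result does not depend on the fuel once it exceeds the list length
lemma findHullFuel_irrel :
    ∀ (f1 : Nat) (s : List (Int × Int)) (p1 p2 : Int × Int) (f2 : Nat),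
      s.length < f1 → s.length < f2 →
      findHullFuel f1 s p1 p2 = findHullFuel f2 s p1 p2 := by
  intro f1
  induction f1 using Nat.strong_induction_on with
  | _ f1 ih =>
    intro s p1 p2 f2 h1 h2
    match f1, f2 with
    | n1+1, n2+1 =>
      rw [findHullFuel_succ, findHullFuel_succ]
      by_cases hs : s = []
      · simp [hs]
      · simp only [hs, if_false]
        cases hfar : (findFarthest s p1 p2).2 with
        | none => rfl
        | some f =>
          have hfs : f ∈ s := by
            rcases far_mem p1 p2 f s (0, none) hfar with h | h
            · exact h
            · simp at h
          rcases hlr : partitionPoints s p1 f p2 with ⟨l, r⟩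
          have hl := partition_lt p1 p2 f s l r hfs hlr
          simp only [hlr]
          rw [ih n1 (Nat.lt_succ_self _) l p1 f n2 (by omega) (by omega),
              ih n1 (Nat.lt_succ_self _) r f p2 n2 (by omega) (by omega)]

-- weight of a work item / bound on the number of remaining loop steps
def itemWeight : HItem → Nat
  | HItem.emit _ => 1
  | HItem.task s _ _ => 4 * s.length + 2

def stackBound (st : List HItem) : Nat := (st.map itemWeight).sum

lemma stackBound_cons (i : HItem) (st : List HItem) :
    stackBound (i :: st) = itemWeight i + stackBound st := by
  simp [stackBound]

-- B's loop result does not depend on the fuel once it exceeds the stack bound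
lemma runStack_irrel :
    ∀ (f1 : Nat) (st : List HItem) (acc : List (Int × Int)) (f2 : Nat),
      stackBound st < f1 → stackBound st < f2 →
      runStack f1 st acc = runStack f2 st acc := by
  intro f1
  induction f1 using Nat.strong_induction_on with
  | _ f1 ih =>
    intro st acc f2 h1 h2
    match f1, f2 with
    | n1+1, n2+1 =>
      match st with
      | [] => rw [runStack_nil, runStack_nil]
      | HItem.emit p :: rest =>
        rw [runStack_emit, runStack_emit]
        have hb : stackBound (HItem.emit p :: rest) = 1 + stackBound rest := by
          rw [stackBound_cons]; rfl
        rw [hb] at h1 h2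
        exact ih n1 (Nat.lt_succ_self _) rest (acc ++ [p]) n2 (by omega) (by omega)
      | HItem.task s p1 p2 :: rest =>
        rw [runStack_task, runStack_task]
        have hb : stackBound (HItem.task s p1 p2 :: rest)
            = 4 * s.length + 2 + stackBound rest := by
          rw [stackBound_cons]; rfl
        rw [hb] at h1 h2
        by_cases hs : s = []
        · simp only [hs, if_true]
          exact ih n1 (Nat.lt_succ_self _) rest acc n2 (by omega) (by omega)
        · simp only [hs, if_false]
          cases hfar : (findFarthest s p1 p2).2 with
          | none => exact ih n1 (Nat.lt_succ_self _) rest acc n2 (by omega) (by omega)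
          | some f =>
            have hfs : f ∈ s := by
              rcases far_mem p1 p2 f s (0, none) hfar with h | h
              · exact h
              · simp at h
            rcases hlr : partitionPoints s p1 f p2 with ⟨l, r⟩
            have hl := partition_lt p1 p2 f s l r hfs hlr
            simp only [hlr]
            have hb' : stackBound (HItem.task l p1 f :: HItem.emit f ::
                HItem.task r f p2 :: rest)
                = 4 * l.length + 2 + (1 + (4 * r.length + 2 + stackBound rest)) := by
              rw [stackBound_cons, stackBound_cons, stackBound_cons]; rfl
            exact ih n1 (Nat.lt_succ_self _) _ acc n2 (by rw [hb']; omega) (by rw [hb']; omega)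

-- canonical (fuel-free) view of the loop
def runC (st : List HItem) (acc : List (Int × Int)) : List (Int × Int) :=
  runStack (stackBound st + 1) st acc

lemma runC_nil (acc : List (Int × Int)) : runC [] acc = acc := by
  simp [runC, runStack_nil]

-- the stack loop processes a task exactly as A's recursion does
lemma runC_task :
    ∀ (n : Nat) (s : List (Int × Int)), s.length = n →
      ∀ (p1 p2 : Int × Int) (rest : List HItem) (acc : List (Int × Int)),
      runC (HItem.task s p1 p2 :: rest) acc = runC rest (acc ++ find_hull s p1 p2) := by
  intro n
  induction n using Nat.strong_induction_on with
  | _ n ih =>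
    intro s hn p1 p2 rest acc
    have hb : stackBound (HItem.task s p1 p2 :: rest)
        = 4 * s.length + 2 + stackBound rest := by
      rw [stackBound_cons]; rfl
    unfold runC
    rw [runStack_task]
    by_cases hs : s = []
    · subst hs
      rw [if_pos rfl]
      have hfh : find_hull ([] : List (Int × Int)) p1 p2 = [] := by
        simp [find_hull, findHullFuel]
      rw [hfh, List.append_nil]
      exact runStack_irrel _ rest acc _ (by rw [hb]; omega) (by omega)
    · simp only [hs, if_false]
      cases hfar : (findFarthest s p1 p2).2 with
      | none =>
        have hfh : find_hull s p1 p2 = [] := by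
          rw [find_hull, findHullFuel_succ]
          simp [hs, hfar]
        rw [hfh, List.append_nil]
        exact runStack_irrel _ rest acc _ (by rw [hb]; omega) (by omega)
      | some f =>
        have hfs : f ∈ s := by
          rcases far_mem p1 p2 f s (0, none) hfar with h | h
          · exact h
          · simp at h
        rcases hlr : partitionPoints s p1 f p2 with ⟨l, r⟩
        have hl := partition_lt p1 p2 f s l r hfs hlr
        simp only [hlr]
        have hb3 : stackBound (HItem.task l p1 f :: HItem.emit f ::
            HItem.task r f p2 :: rest)
            = 4 * l.length + 2 + (1 + (4 * r.length + 2 + stackBound rest)) := by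
          rw [stackBound_cons, stackBound_cons, stackBound_cons]; rfl
        have step1 : runStack (stackBound (HItem.task s p1 p2 :: rest))
            (HItem.task l p1 f :: HItem.emit f :: HItem.task r f p2 :: rest) acc
            = runC (HItem.task l p1 f :: HItem.emit f :: HItem.task r f p2 :: rest) acc :=
          runStack_irrel _ _ acc _ (by rw [hb3, hb]; omega) (by omega)
        rw [step1, ih l.length (by omega) l rfl p1 f _ acc]
        have hb4 : stackBound (HItem.emit f :: HItem.task r f p2 :: rest)
            = 1 + (4 * r.length + 2 + stackBound rest) := by
          rw [stackBound_cons, stackBound_cons]; rfl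
        have hb5 : stackBound (HItem.task r f p2 :: rest)
            = 4 * r.length + 2 + stackBound rest := by
          rw [stackBound_cons]; rfl
        unfold runC
        rw [hb4, runStack_emit]
        have step2 : runStack (1 + (4 * r.length + 2 + stackBound rest))
            (HItem.task r f p2 :: rest) (acc ++ find_hull l p1 f ++ [f])
            = runC (HItem.task r f p2 :: rest) (acc ++ find_hull l p1 f ++ [f]) :=
          runStack_irrel _ _ _ _ (by rw [hb5]; omega) (by rw [hb5]; omega)
        rw [step2, ih r.length (by omega) r rfl f p2 rest _]
        have hA : find_hull s p1 p2
            = find_hull l p1 f ++ [f] ++ find_hull r f p2 := by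
          rw [find_hull, findHullFuel_succ]
          simp only [hs, if_false, hfar, hlr]
          rw [show find_hull l p1 f = findHullFuel (l.length+1) l p1 f from rfl,
              show find_hull r f p2 = findHullFuel (r.length+1) r f p2 from rfl,
              findHullFuel_irrel s.length l p1 f (l.length + 1) (by omega) (by omega),
              findHullFuel_irrel s.length r f p2 (r.length + 1) (by omega) (by omega)]
        rw [hA]
        simp [runC, List.append_assoc]

lemma alt_eq (points_set : List (Int × Int)) (p1 p2 : Int × Int) :
    find_hull_alt points_set p1 p2 = find_hull points_set p1 p2 := by
  unfold find_hull_alt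
  have hb : stackBound [HItem.task points_set p1 p2] = 4 * points_set.length + 2 := by
    rw [stackBound_cons]; simp [stackBound, itemWeight]
  have h1 : runStack (4 * points_set.length + 3) [HItem.task points_set p1 p2] []
      = runC [HItem.task points_set p1 p2] [] :=
    runStack_irrel _ _ _ _ (by rw [hb]; omega) (by omega)
  rw [h1, runC_task points_set.length points_set rfl p1 p2 [] [], runC_nil]
  simp

-- ===== VERDICT (by name: the statement is the Claim_ definition above) =====
theorem find_hull_spec : Claim_equal_find_hull := by
  intro points_set p1 p2 _
  unfold Spec_find_hull
  exact (alt_eq points_set p1 p2).symm
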